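-- pv_equiv track=rewrite | github.com/SimonKocurek/Algorithms-and-Fun | python/simon_kocurek_vacuum_first_round.py | are_synonyms
-- ===== SOURCE A (Python) =====
-- from typing import List, Tuple, Set, Dict
--
-- def get_all_words(synonyms: List[Tuple[str, str]]) -> Set[str]:
--     result = set()
--
--     for synonym in synonyms:
--         first_word = synonym[0].lower()
--         second_word = synonym[1].lower()
--
--         result.add(first_word)
--         result.add(second_word)
--
--     return result
--
-- def get_word_indexes(words: List[str]) -> Dict[str, int]:
--     word_indexes: Dict[str, int] = {}
--
--     for i, word in enumerate(words):
--         word_indexes[word] = i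
--
--     return word_indexes
--
-- def union(components: List[int], component_sizes: List[int], first: int, second: int) -> None:
--     """
--     Union part of Union-Find
--     """
--     first_root = find(components, first)
--     second_root = find(components, second)
--
--     if first_root == second_root:
--         return
--
--     if component_sizes[first_root] >= component_sizes[second_root]:
--         component_sizes[first_root] += component_sizes[second_root]
--         components[second_root] = first_root
--     else:
--         component_sizes[second_root] += component_sizes[first_root]
--         components[first_root] = second_root
--
-- def find(components: List[int], idx: int) -> int:
--     """
--     Find part of Union-Find
--     """
--     if components[idx] == idx:
--         return idx
--
--     components[idx] = find(components, components[idx])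
--     return components[idx]
--
-- def get_components(synonyms: List[Tuple[str, str]]) -> Dict[str, int]:
--     all_words = list(get_all_words(synonyms))
--     word_indexes = get_word_indexes(all_words)
--
--     # Each graph component symbolizes a group of synonyms
--     components = [i for i in range(len(all_words))]
--     component_sizes = [1 for i in range(len(all_words))]
--
--     for synonym in synonyms:
--         first_word = synonym[0].lower()
--         second_word = synonym[1].lower()
--
--         union(components, component_sizes, word_indexes[first_word], word_indexes[second_word])
--
--     result = {}
--
--     for i, word in enumerate(all_words):
--         result[word] = find(components, i)
--
--     return result
--
-- def are_synonyms(synonyms: List[Tuple[str, str]], queries: List[Tuple[str, str]]) -> List[str]: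
--     word_components = get_components(synonyms)
--     result = []
--
--     for query in queries:
--         first_word = query[0].lower()
--         second_word = query[1].lower()
--
--         if first_word == second_word:
--             result.append('synonyms\n')
--
--         elif first_word in word_components and \
--                 second_word in word_components and \
--                 word_components[first_word] == word_components[second_word]:
--             result.append('synonyms\n')
--
--         else:
--             result.append('different\n')
--
--     return result
-- ===== SOURCE B (Python) =====
-- def are_synonyms(synonyms, queries):
--     # Merge-by-relabel connected components: no union-find, no index arrays.
--     labels = {}
--     fresh = 0
--     for pair in synonyms:
--         a = pair[0].lower()
--         b = pair[1].lower()
--         if a not in labels: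
--             labels[a] = fresh
--             fresh += 1
--         if b not in labels:
--             labels[b] = fresh
--             fresh += 1
--         la = labels[a]
--         lb = labels[b]
--         if la != lb:
--             labels = {w: (la if v == lb else v) for w, v in labels.items()}
--     out = []
--     for query in queries:
--         x = query[0].lower()
--         y = query[1].lower()
--         if x == y or (x in labels and y in labels and labels[x] == labels[y]):
--             out.append('synonyms\n')
--         else:
--             out.append('different\n')
--     return out
-- ===== Notes on version B (the rewrite author's own statement) =====
-- stated objective: simpler
-- what changed: Replaced the union-find machinery (word list, index dict, parent/size arrays, recursive find with path compression) by a single word->label dict whose classes are merged by relabelling, so components are read off directly.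
import Mathlib
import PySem

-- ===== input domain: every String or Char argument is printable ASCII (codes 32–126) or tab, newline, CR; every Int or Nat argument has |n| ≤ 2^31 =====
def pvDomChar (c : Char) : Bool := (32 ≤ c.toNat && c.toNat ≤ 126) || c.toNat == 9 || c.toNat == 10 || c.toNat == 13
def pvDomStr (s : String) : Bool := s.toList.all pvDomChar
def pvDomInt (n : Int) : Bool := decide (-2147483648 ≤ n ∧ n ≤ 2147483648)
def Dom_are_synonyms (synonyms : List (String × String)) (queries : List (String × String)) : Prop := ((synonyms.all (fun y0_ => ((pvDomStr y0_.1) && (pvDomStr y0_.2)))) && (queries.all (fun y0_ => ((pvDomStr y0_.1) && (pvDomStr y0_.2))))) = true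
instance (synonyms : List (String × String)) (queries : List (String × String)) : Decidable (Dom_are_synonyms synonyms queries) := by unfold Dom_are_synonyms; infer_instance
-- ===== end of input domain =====

-- B replaces A's union-find (index dict, parent/size arrays, recursive find) by one
-- word->label dict merged by relabelling: a different algorithm chosen for simplicity, not speed.

-- ===== PORT A =====
-- get_all_words: a Python set of the lowercased words (iteration order of CPython sets is
-- unspecified; the final output provably does not depend on it, see the proofs below).
def get_all_words (synonyms : List (String × String)) : PySem.Set String :=
  synonyms.foldl
    (fun r p => PySem.Set.add (PySem.Set.add r (PySem.Str.lower p.1)) (PySem.Str.lower p.2)) []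

-- get_word_indexes: dict word -> index (indices are nonnegative list positions, kept as Nat)
def get_word_indexes (words : List String) : PySem.Dict String Nat :=
  words.zipIdx.foldl (fun d p => d.insert p.1 p.2) PySem.Dict.empty

-- find: recursive find with path compression; the Python recursion terminates because the
-- parent structure is a forest — fuel = len(components) is provably sufficient (pvFind_spec).
def pvFind (fuel : Nat) (c : List Nat) (i : Nat) : List Nat × Nat :=
  match fuel with
  | 0 => (c, i)
  | fuel + 1 =>
    if c.getD i 0 = i then (c, i)
    else
      let r := pvFind fuel c (c.getD i 0)
      (r.1.set i r.2, r.2)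

-- union: union-by-size, returning the mutated (components, component_sizes)
def pvUnion (c s : List Nat) (first second : Nat) : List Nat × List Nat :=
  let f1 := pvFind c.length c first
  let f2 := pvFind f1.1.length f1.1 second
  let first_root := f1.2
  let second_root := f2.2
  if first_root = second_root then (f2.1, s)
  else if s.getD second_root 0 ≤ s.getD first_root 0 then
    (f2.1.set second_root first_root, s.set first_root (s.getD first_root 0 + s.getD second_root 0))
  else
    (f2.1.set first_root second_root, s.set second_root (s.getD second_root 0 + s.getD first_root 0))

def get_components (synonyms : List (String × String)) : PySem.Dict String Nat :=
  let all_words : List String := get_all_words synonyms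
  let word_indexes := get_word_indexes all_words
  let components := List.range all_words.length
  let component_sizes := List.replicate all_words.length 1
  let cs := synonyms.foldl
    (fun (cs : List Nat × List Nat) p =>
      pvUnion cs.1 cs.2 (word_indexes.getD (PySem.Str.lower p.1) 0)
        (word_indexes.getD (PySem.Str.lower p.2) 0))
    (components, component_sizes)
  let res := all_words.zipIdx.foldl
    (fun (acc : PySem.Dict String Nat × List Nat) p =>
      let f := pvFind acc.2.length acc.2 p.2
      (acc.1.insert p.1 f.2, f.1))
    (PySem.Dict.empty, cs.1)
  res.1

def are_synonyms (synonyms : List (String × String)) (queries : List (String × String)) : List String :=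
  let word_components := get_components synonyms
  queries.foldl
    (fun result q =>
      let first_word := PySem.Str.lower q.1
      let second_word := PySem.Str.lower q.2
      if first_word = second_word then result ++ ["synonyms\n"]
      else if word_components.contains first_word && word_components.contains second_word &&
          (word_components.getD first_word 0 == word_components.getD second_word 0) then
        result ++ ["synonyms\n"]
      else result ++ ["different\n"])
    []

-- ===== PORT B =====
def are_synonyms_alt (synonyms : List (String × String)) (queries : List (String × String)) : List String :=
  let st := synonyms.foldl
    (fun (st : PySem.Dict String Nat × Nat) p =>
      let a := PySem.Str.lower p.1
      let b := PySem.Str.lower p.2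
      let st1 := if st.1.contains a then st else (st.1.insert a st.2, st.2 + 1)
      let st2 := if st1.1.contains b then st1 else (st1.1.insert b st1.2, st1.2 + 1)
      let la := st2.1.getD a 0
      let lb := st2.1.getD b 0
      if la = lb then st2
      else (PySem.Dict.mk (st2.1.items.map (fun w => (w.1, if w.2 = lb then la else w.2))), st2.2))
    (PySem.Dict.empty, 0)
  let labels := st.1
  queries.foldl
    (fun out q =>
      let x := PySem.Str.lower q.1
      let y := PySem.Str.lower q.2
      if x = y || (labels.contains x && labels.contains y && (labels.getD x 0 == labels.getD y 0))
      then out ++ ["synonyms\n"]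
      else out ++ ["different\n"])
    []

-- ===== PRECONDITION & SPEC =====
def Spec_are_synonyms (synonyms : List (String × String)) (queries : List (String × String)) (out : List String) : Prop := out = are_synonyms_alt synonyms queries
instance (synonyms : List (String × String)) (queries : List (String × String)) (out : List String) : Decidable (Spec_are_synonyms synonyms queries out) := by unfold Spec_are_synonyms; infer_instance

-- ===== CLAIM (what is proved, stated in full; the proofs are below) =====
def Claim_equal_are_synonyms : Prop := ∀ (synonyms : List (String × String)) (queries : List (String × String)), Dom_are_synonyms synonyms queries → Spec_are_synonyms synonyms queries (are_synonyms synonyms queries)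

-- ===== LEMMAS AND PROOFS =====

-- The union-find forest invariant: ρ is the (ghost) root map, r a (ghost) rank that strictly
-- increases along parent links, bounded so that fuel = n always reaches the root.
structure pvInv (c : List Nat) (ρ r : Nat → Nat) (n : Nat) : Prop where
  len : c.length = n
  pb : ∀ i, i < n → c.getD i 0 < n
  rfix : ∀ i, i < n → c.getD (ρ i) 0 = ρ i
  rhob : ∀ i, i < n → ρ i < n
  compat : ∀ i, i < n → ρ (c.getD i 0) = ρ i
  rstep : ∀ i, i < n → c.getD i 0 ≠ i → r i < r (c.getD i 0)
  rroot : ∀ i, i < n → i ≠ ρ i → r i < r (ρ i)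
  req : ∀ i, i < n → c.getD i 0 = i → ρ i = i
  rbound : ∀ i, i < n → r i + (List.range n).countP (fun j => c.getD j 0 == j) ≤ n

-- coupling between A's ghost root map and B's label dict
def pvCpl (words : List String) (ρ : Nat → Nat) (d : PySem.Dict String Nat) (fresh : Nat) : Prop :=
  (∀ w, d.contains w = true → w ∈ words) ∧
  (∀ w v, d.get? w = some v → v < fresh) ∧
  (∀ k1 k2, (h1 : k1 < words.length) → (h2 : k2 < words.length) →
     d.contains words[k1] = true → d.contains words[k2] = true →
     (d.getD words[k1] 0 = d.getD words[k2] 0 ↔ ρ k1 = ρ k2)) ∧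
  (∀ k, (h : k < words.length) → d.contains words[k] = false →
     ∀ j, j < words.length → (ρ j = ρ k ↔ j = k))

theorem pvGetD_set_self (c : List Nat) (i v : Nat) (h : i < c.length) :
    (c.set i v).getD i 0 = v := by
  simp [List.getD, h]

theorem pvGetD_set_ne (c : List Nat) (i j v : Nat) (h : j ≠ i) :
    (c.set i v).getD j 0 = c.getD j 0 := by
  simp [List.getD]
  rw [List.getElem?_set_ne (by omega)]

theorem pvCountP_flip (l : List Nat) (p q : Nat → Bool) (j : Nat) (hl : l.Nodup) (hj : j ∈ l)
    (hagree : ∀ x ∈ l, x ≠ j → p x = q x) (hpj : p j = false) (hqj : q j = true) :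
    l.countP p + 1 = l.countP q := by
  induction l with
  | nil => cases hj
  | cons a t ih =>
    rcases List.mem_cons.mp hj with h' | hjt
    · have hnot : j ∉ t := h' ▸ (List.nodup_cons.mp hl).1
      have ht : t.countP p = t.countP q := by
        apply List.countP_congr
        intro x hx
        rw [hagree x (List.mem_cons_of_mem _ hx) (fun h => hnot (h ▸ hx))]
      simp [← h', hpj, hqj, ht]
    · have hne : a ≠ j := fun h => ((List.nodup_cons.mp hl).1 (h ▸ hjt))
      have hpa : p a = q a := hagree a (List.mem_cons_self) hne
      have := ih (List.nodup_cons.mp hl).2 hjt (fun x hx => hagree x (List.mem_cons_of_mem _ hx))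
      simp [List.countP_cons, hpa]
      omega

theorem pvCompress (c : List Nat) (ρ r : Nat → Nat) (n i : Nat) (h : pvInv c ρ r n)
    (hi : i < n) (hρ : ρ i ≠ i) : pvInv (c.set i (ρ i)) ρ r n := by
  have hlen := h.len
  have hi' : i < c.length := by omega
  have hnr : c.getD i 0 ≠ i := fun hc => hρ (h.req i hi hc)
  have hne_root : ∀ j, j < n → ρ j ≠ i := by
    intro j hj hji
    have := h.rfix j hj
    rw [hji] at this
    exact hρ (h.req i hi this)
  constructor
  · simpa using hlen
  · intro j hj
    by_cases hji : j = i
    · subst hji; rw [pvGetD_set_self _ _ _ hi']; exact h.rhob j hj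
    · rw [pvGetD_set_ne _ _ _ _ hji]; exact h.pb j hj
  · intro j hj
    rw [pvGetD_set_ne _ _ _ _ (hne_root j hj)]
    exact h.rfix j hj
  · exact h.rhob
  · intro j hj
    by_cases hji : j = i
    · subst hji
      rw [pvGetD_set_self _ _ _ hi']
      exact h.req (ρ j) (h.rhob j hj) (h.rfix j hj)
    · rw [pvGetD_set_ne _ _ _ _ hji]; exact h.compat j hj
  · intro j hj hne
    by_cases hji : j = i
    · subst hji
      rw [pvGetD_set_self _ _ _ hi'] at *
      exact h.rroot j hj (Ne.symm hρ)
    · rw [pvGetD_set_ne _ _ _ _ hji] at *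
      exact h.rstep j hj hne
  · exact h.rroot
  · intro j hj hc
    by_cases hji : j = i
    · subst hji; rw [pvGetD_set_self _ _ _ hi'] at hc; exact absurd hc hρ
    · rw [pvGetD_set_ne _ _ _ _ hji] at hc; exact h.req j hj hc
  · intro j hj
    have : (List.range n).countP (fun k => (c.set i (ρ i)).getD k 0 == k)
        = (List.range n).countP (fun k => c.getD k 0 == k) := by
      apply List.countP_congr
      intro x hx
      by_cases hxi : x = i
      · subst hxi
        rw [pvGetD_set_self _ _ _ hi']
        rw [beq_eq_false_iff_ne.mpr hρ, beq_eq_false_iff_ne.mpr hnr]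
      · rw [pvGetD_set_ne _ _ _ _ hxi]
    rw [this]
    exact h.rbound j hj

theorem pvFind_spec (f : Nat) : ∀ (c : List Nat) (ρ r : Nat → Nat) (n i : Nat),
    pvInv c ρ r n → i < n → n ≤ r i + f →
    (pvFind f c i).2 = ρ i ∧ pvInv (pvFind f c i).1 ρ r n := by
  induction f with
  | zero =>
    intro c ρ r n i h hi hf
    exfalso
    have hpos : 0 < (List.range n).countP (fun j => c.getD j 0 == j) := by
      apply List.countP_pos_iff.mpr
      exact ⟨ρ i, List.mem_range.mpr (h.rhob i hi), beq_iff_eq.mpr (h.rfix i hi)⟩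
    have := h.rbound i hi
    omega
  | succ f ih =>
    intro c ρ r n i h hi hf
    by_cases hroot : c.getD i 0 = i
    · simp only [pvFind, if_pos hroot]
      exact ⟨(h.req i hi hroot).symm, h⟩
    · have hp : c.getD i 0 < n := h.pb i hi
      have hfuel : n ≤ r (c.getD i 0) + f := by
        have := h.rstep i hi hroot
        omega
      obtain ⟨h1, h2⟩ := ih c ρ r n (c.getD i 0) h hp hfuel
      have hρi : ρ i ≠ i := by
        intro hc
        apply hroot
        have hfx := h.rfix i hi
        rw [hc] at hfx
        exact hfx
      simp only [pvFind, if_neg hroot]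
      rw [h1, h.compat i hi]
      exact ⟨rfl, pvCompress _ _ _ _ _ h2 hi hρi⟩

theorem pvMerge_ker (la lb v1 v2 : Nat) :
    ((if v1 = lb then la else v1) = (if v2 = lb then la else v2)) ↔
      (v1 = v2 ∨ ((v1 = la ∨ v1 = lb) ∧ (v2 = la ∨ v2 = lb))) := by
  split_ifs <;> omega

theorem pvMerge_spec (c : List Nat) (ρ r : Nat → Nat) (n x y : Nat) (h : pvInv c ρ r n)
    (hx : x < n) (hy : y < n) (hρx : ρ x = x) (hρy : ρ y = y) (hxy : x ≠ y) :
    pvInv (c.set y x) (fun j => if ρ j = y then x else ρ j)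
      (fun j => if j = x then max (r x) (r y) + 1 else r j) n := by
  have hlen := h.len
  have hy' : y < c.length := by omega
  have hrooty : c.getD y 0 = y := by have := h.rfix y hy; rwa [hρy] at this
  have hrootx : c.getD x 0 = x := by have := h.rfix x hx; rwa [hρx] at this
  have hle : ∀ k, r k ≤ (fun j => if j = x then max (r x) (r y) + 1 else r j) k := by
    intro k; dsimp; split
    · rename_i hk; subst hk; omega
    · omega
  have hflip : (List.range n).countP (fun j => (c.set y x).getD j 0 == j) + 1
      = (List.range n).countP (fun j => c.getD j 0 == j) := by
    apply pvCountP_flip _ _ _ y (List.nodup_range) (List.mem_range.mpr hy)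
    · intro k _ hk
      rw [pvGetD_set_ne _ _ _ _ hk]
    · rw [pvGetD_set_self _ _ _ hy']
      exact beq_eq_false_iff_ne.mpr hxy
    · exact beq_iff_eq.mpr hrooty
  constructor
  · simpa using hlen
  · intro j hj
    by_cases hjy : j = y
    · subst hjy; rw [pvGetD_set_self _ _ _ hy']; exact hx
    · rw [pvGetD_set_ne _ _ _ _ hjy]; exact h.pb j hj
  · intro j hj
    dsimp only
    by_cases hjy : ρ j = y
    · rw [if_pos hjy, pvGetD_set_ne _ _ _ _ hxy]; exact hrootx
    · rw [if_neg hjy, pvGetD_set_ne _ _ _ _ hjy]; exact h.rfix j hj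
  · intro j hj
    dsimp only; split
    · exact hx
    · exact h.rhob j hj
  · intro j hj
    dsimp only
    by_cases hjy : j = y
    · subst hjy
      rw [pvGetD_set_self _ _ _ hy']
      rw [if_pos hρy, if_neg (by rw [hρx]; exact hxy)]
      exact hρx
    · rw [pvGetD_set_ne _ _ _ _ hjy, h.compat j hj]
  · intro j hj hne
    dsimp only
    by_cases hjy : j = y
    · subst hjy
      rw [pvGetD_set_self _ _ _ hy'] at *
      rw [if_neg (Ne.symm hxy), if_pos rfl]
      omega
    · rw [pvGetD_set_ne _ _ _ _ hjy] at *
      have hjx : j ≠ x := by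
        intro hc; subst hc; exact hne hrootx
      rw [if_neg hjx]
      calc r j < r (c.getD j 0) := h.rstep j hj hne
        _ ≤ _ := hle _
  · intro j hj hne
    dsimp only at *
    by_cases hjy : ρ j = y
    · rw [if_pos hjy] at *
      have hjx : j ≠ x := by
        intro hc; subst hc; rw [hρx] at hjy; exact hxy hjy
      rw [if_neg hjx, if_pos rfl]
      by_cases hjy2 : j = y
      · subst hjy2; omega
      · have : r j < r (ρ j) := h.rroot j hj (by rw [hjy]; exact hjy2)
        rw [hjy] at this
        omega
    · rw [if_neg hjy] at *
      have hjx : j ≠ x := by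
        intro hc; subst hc; rw [hρx] at hne; exact hne rfl
      rw [if_neg hjx]
      calc r j < r (ρ j) := h.rroot j hj hne
        _ ≤ _ := hle _
  · intro j hj hc
    dsimp only
    by_cases hjy : j = y
    · subst hjy
      rw [pvGetD_set_self _ _ _ hy'] at hc
      exact absurd hc hxy
    · rw [pvGetD_set_ne _ _ _ _ hjy] at hc
      have := h.req j hj hc
      rw [if_neg (by rw [this]; exact hjy)]
      exact this
  · intro j hj
    have hbx := h.rbound x hx
    have hby := h.rbound y hy
    have hbj := h.rbound j hj
    split <;> omega

theorem pvUnion_spec (c s : List Nat) (ρ r : Nat → Nat) (n a b : Nat) (h : pvInv c ρ r n)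
    (ha : a < n) (hb : b < n) :
    ∃ ρ' r', pvInv (pvUnion c s a b).1 ρ' r' n ∧
      (∀ i j, i < n → j < n →
        (ρ' i = ρ' j ↔ (ρ i = ρ j ∨ ((ρ i = ρ a ∨ ρ i = ρ b) ∧ (ρ j = ρ a ∨ ρ j = ρ b))))) := by
  have hlen := h.len
  obtain ⟨hf1, hInv1⟩ := pvFind_spec c.length c ρ r n a h ha (by omega)
  obtain ⟨hf2, hInv2⟩ := pvFind_spec (pvFind c.length c a).1.length (pvFind c.length c a).1 ρ r n b
    hInv1 hb (by have := hInv1.len; omega)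
  have hra : ρ (ρ a) = ρ a := hInv2.req (ρ a) (hInv2.rhob a ha) (hInv2.rfix a ha)
  have hrb : ρ (ρ b) = ρ b := hInv2.req (ρ b) (hInv2.rhob b hb) (hInv2.rfix b hb)
  unfold pvUnion
  simp only [hf1, hf2]
  by_cases heq : ρ a = ρ b
  · rw [if_pos heq]
    refine ⟨ρ, r, hInv2, ?_⟩
    intro i j _ _
    constructor
    · exact fun hh => Or.inl hh
    · rintro (hh | ⟨h1, h2⟩)
      · exact hh
      · rcases h1 with h1 | h1 <;> rcases h2 with h2 | h2 <;> omega
  · rw [if_neg heq]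
    by_cases hs : s.getD (ρ b) 0 ≤ s.getD (ρ a) 0
    · rw [if_pos hs]
      refine ⟨fun j => if ρ j = ρ b then ρ a else ρ j,
        fun j => if j = ρ a then max (r (ρ a)) (r (ρ b)) + 1 else r j,
        pvMerge_spec _ _ _ _ _ _ hInv2 (hInv2.rhob a ha) (hInv2.rhob b hb) hra hrb heq, ?_⟩
      intro i j _ _
      exact pvMerge_ker (ρ a) (ρ b) (ρ i) (ρ j)
    · rw [if_neg hs]
      refine ⟨fun j => if ρ j = ρ a then ρ b else ρ j,
        fun j => if j = ρ b then max (r (ρ b)) (r (ρ a)) + 1 else r j,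
        pvMerge_spec _ _ _ _ _ _ hInv2 (hInv2.rhob b hb) (hInv2.rhob a ha) hrb hra
          (Ne.symm heq), ?_⟩
      intro i j _ _
      rw [pvMerge_ker (ρ b) (ρ a) (ρ i) (ρ j)]
      tauto

theorem pvGet?_mapVal (l : List (String × Nat)) (f : Nat → Nat) (w : String) :
    (PySem.Dict.mk (l.map (fun p => (p.1, f p.2)))).get? w
      = ((PySem.Dict.mk l).get? w).map f := by
  induction l with
  | nil => simp [PySem.Dict.get?]
  | cons p t ih =>
    rw [List.map_cons]
    rw [PySem.Dict.get?_mk_cons, PySem.Dict.get?_mk_cons]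
    by_cases hk : p.1 == w
    · simp [hk]
    · simp only [hk, Bool.false_eq_true, ite_false]
      exact ih

theorem pvSet_add_nodup (s : PySem.Set String) (x : String) (h : s.Nodup) :
    (PySem.Set.add s x).Nodup := by
  unfold PySem.Set.add
  split
  · exact h
  · rename_i hc
    have hx : x ∉ s := by simpa using (Bool.not_eq_true _).mp hc
    simp [List.nodup_append, h]
    exact fun a ha he => hx (he ▸ ha)

theorem pvWords_mem_aux (syns : List (String × String)) :
    ∀ (acc : PySem.Set String) (w : String),
    w ∈ syns.foldl
      (fun r p => PySem.Set.add (PySem.Set.add r (PySem.Str.lower p.1)) (PySem.Str.lower p.2)) acc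
    ↔ w ∈ acc ∨ ∃ p ∈ syns, w = PySem.Str.lower p.1 ∨ w = PySem.Str.lower p.2 := by
  induction syns with
  | nil => intro acc w; simp
  | cons q t ih =>
    intro acc w
    rw [List.foldl_cons, ih]
    rw [PySem.Set.mem_add, PySem.Set.mem_add]
    simp only [List.mem_cons]
    constructor
    · rintro (((hw | hw) | hw) | ⟨p, hp, hor⟩)
      · exact Or.inl hw
      · exact Or.inr ⟨q, Or.inl rfl, Or.inl hw⟩
      · exact Or.inr ⟨q, Or.inl rfl, Or.inr hw⟩
      · exact Or.inr ⟨p, Or.inr hp, hor⟩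
    · rintro (hw | ⟨p, (hp | hp), hor⟩)
      · exact Or.inl (Or.inl (Or.inl hw))
      · subst hp; rcases hor with hor | hor
        · exact Or.inl (Or.inl (Or.inr hor))
        · exact Or.inl (Or.inr hor)
      · exact Or.inr ⟨p, hp, hor⟩

theorem pvWords_mem (syns : List (String × String)) (w : String) :
    w ∈ get_all_words syns
    ↔ ∃ p ∈ syns, w = PySem.Str.lower p.1 ∨ w = PySem.Str.lower p.2 := by
  rw [get_all_words, pvWords_mem_aux]
  simp

theorem pvWords_nodup_aux (syns : List (String × String)) :
    ∀ (acc : PySem.Set String), acc.Nodup →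
    (syns.foldl
      (fun r p => PySem.Set.add (PySem.Set.add r (PySem.Str.lower p.1)) (PySem.Str.lower p.2))
      acc).Nodup := by
  induction syns with
  | nil => intro acc h; exact h
  | cons q t ih =>
    intro acc h
    exact ih _ (pvSet_add_nodup _ _ (pvSet_add_nodup _ _ h))

theorem pvWords_nodup (syns : List (String × String)) : (get_all_words syns).Nodup :=
  pvWords_nodup_aux syns [] List.nodup_nil

theorem pvIdx_items (words : List String) (hnd : words.Nodup) :
    (get_word_indexes words).items = words.zipIdx := by
  rw [get_word_indexes]
  have h := PySem.Dict.items_foldl_insert_fresh words.zipIdx Prod.fst Prod.snd PySem.Dict.empty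
    (fun a _ => PySem.Dict.contains_empty _)
    (by rw [List.zipIdx_map_fst]; exact hnd)
  simpa using h

theorem pvIdx_getD (words : List String) (hnd : words.Nodup) (k : Nat) (hk : k < words.length) :
    (get_word_indexes words).getD words[k] 0 = k := by
  apply PySem.Dict.getD_of_mem_items
  · rw [pvIdx_items words hnd]
    have hmem : words.zipIdx[k]'(by simpa using hk) ∈ words.zipIdx := List.getElem_mem _
    rwa [List.getElem_zipIdx, Nat.zero_add] at hmem
  · show (get_word_indexes words).keys.Nodup
    have : (get_word_indexes words).keys = words := by
      show (get_word_indexes words).items.map Prod.fst = words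
      rw [pvIdx_items words hnd, List.zipIdx_map_fst]
    rw [this]; exact hnd

theorem pvCpl_insert (words : List String) (ρ : Nat → Nat) (d : PySem.Dict String Nat)
    (fresh : Nat) (hnd : words.Nodup) (hC : pvCpl words ρ d fresh) (ka : Nat)
    (hka : ka < words.length) (hnc : d.contains words[ka] = false) :
    pvCpl words ρ (d.insert words[ka] fresh) (fresh + 1) := by
  obtain ⟨h1, h2, h3, h4⟩ := hC
  have hinj : ∀ k1 k2 (hk1 : k1 < words.length) (hk2 : k2 < words.length),
      words[k1] = words[k2] → k1 = k2 :=
    fun k1 k2 hk1 hk2 he => (List.Nodup.getElem_inj_iff hnd).mp he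
  refine ⟨?_, ?_, ?_, ?_⟩
  · intro w hw
    rw [PySem.Dict.contains_insert] at hw
    rcases Bool.or_eq_true_iff.mp hw with hw | hw
    · rw [(beq_iff_eq).mp hw]; exact List.getElem_mem _
    · exact h1 w hw
  · intro w v hv
    rw [PySem.Dict.get?_insert] at hv
    split at hv
    · cases hv; omega
    · have := h2 w v hv; omega
  · intro k1 k2 hk1 hk2 hc1 hc2
    rw [PySem.Dict.contains_insert] at hc1 hc2
    rw [PySem.Dict.getD_insert, PySem.Dict.getD_insert]
    by_cases he1 : words[k1] = words[ka]
    · have hke1 : k1 = ka := hinj _ _ hk1 hka he1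
      by_cases he2 : words[k2] = words[ka]
      · have hke2 : k2 = ka := hinj _ _ hk2 hka he2
        subst hke1; subst hke2
        simp
      · rw [if_pos he1, if_neg he2]
        have hc2' : d.contains words[k2] = true := by
          rcases Bool.or_eq_true_iff.mp hc2 with hw | hw
          · exact absurd (beq_iff_eq.mp hw) he2
          · exact hw
        have hv2 : ∃ v, d.get? words[k2] = some v := by
          rw [PySem.Dict.contains_eq_isSome_get?] at hc2'
          exact Option.isSome_iff_exists.mp hc2'
        obtain ⟨v2, hv2⟩ := hv2
        have hlt : v2 < fresh := h2 _ _ hv2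
        have hgd : d.getD words[k2] 0 = v2 := by
          rw [PySem.Dict.getD_eq_get?_getD, hv2]; rfl
        rw [hgd]
        constructor
        · intro hh; omega
        · intro hh
          rw [hke1] at hh
          have hk2a : k2 = ka := (h4 ka hka hnc k2 hk2).mp hh.symm
          exact absurd (hk2a ▸ rfl) he2
    · by_cases he2 : words[k2] = words[ka]
      · have hke2 : k2 = ka := hinj _ _ hk2 hka he2
        rw [if_neg he1, if_pos he2]
        have hc1' : d.contains words[k1] = true := by
          rcases Bool.or_eq_true_iff.mp hc1 with hw | hw
          · exact absurd (beq_iff_eq.mp hw) he1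
          · exact hw
        have hv1 : ∃ v, d.get? words[k1] = some v := by
          rw [PySem.Dict.contains_eq_isSome_get?] at hc1'
          exact Option.isSome_iff_exists.mp hc1'
        obtain ⟨v1, hv1⟩ := hv1
        have hlt : v1 < fresh := h2 _ _ hv1
        have hgd : d.getD words[k1] 0 = v1 := by
          rw [PySem.Dict.getD_eq_get?_getD, hv1]; rfl
        rw [hgd]
        constructor
        · intro hh; omega
        · intro hh
          rw [hke2] at hh
          have hk1a : k1 = ka := (h4 ka hka hnc k1 hk1).mp hh
          exact absurd (hk1a ▸ rfl) he1
      · rw [if_neg he1, if_neg he2]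
        have hc1' : d.contains words[k1] = true := by
          rcases Bool.or_eq_true_iff.mp hc1 with hw | hw
          · exact absurd (beq_iff_eq.mp hw) he1
          · exact hw
        have hc2' : d.contains words[k2] = true := by
          rcases Bool.or_eq_true_iff.mp hc2 with hw | hw
          · exact absurd (beq_iff_eq.mp hw) he2
          · exact hw
        exact h3 k1 k2 hk1 hk2 hc1' hc2'
  · intro k hk hc j hj
    rw [PySem.Dict.contains_insert, Bool.or_eq_false_iff] at hc
    exact h4 k hk hc.2 j hj

theorem pvResult_spec (n : Nat) (ρ r : Nat → Nat) :
    ∀ (l : List (String × Nat)) (c : List Nat) (acc : PySem.Dict String Nat),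
    pvInv c ρ r n → (∀ p ∈ l, p.2 < n) → (∀ p ∈ l, acc.contains p.1 = false) →
    (l.map Prod.fst).Nodup →
    (l.foldl (fun (acc : PySem.Dict String Nat × List Nat) p =>
        let f := pvFind acc.2.length acc.2 p.2
        (acc.1.insert p.1 f.2, f.1)) (acc, c)).1.items
      = acc.items ++ l.map (fun p => (p.1, ρ p.2)) := by
  intro l
  induction l with
  | nil => intro c acc _ _ _ _; simp
  | cons p t ih =>
    intro c acc hInv hlt hcont hnd
    have hlen := hInv.len
    obtain ⟨hval, hInv'⟩ := pvFind_spec c.length c ρ r n p.2 hInv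
      (hlt p List.mem_cons_self) (by omega)
    have hnd' : (p.1 :: t.map Prod.fst).Nodup := by simpa using hnd
    have hcont' : ∀ q ∈ t, (acc.insert p.1 (ρ p.2)).contains q.1 = false := by
      intro q hq
      rw [PySem.Dict.contains_insert, Bool.or_eq_false_iff]
      refine ⟨?_, hcont q (List.mem_cons_of_mem _ hq)⟩
      rw [beq_eq_false_iff_ne]
      intro he
      have hm : q.1 ∈ t.map Prod.fst := List.mem_map_of_mem hq
      rw [he] at hm
      exact (List.nodup_cons.mp hnd').1 hm
    rw [List.foldl_cons]
    simp only [hval]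
    rw [ih (pvFind c.length c p.2).1 (acc.insert p.1 (ρ p.2)) hInv'
      (fun q hq => hlt q (List.mem_cons_of_mem _ hq))
      hcont' (List.nodup_cons.mp hnd').2]
    rw [PySem.Dict.items_insert_of_not_contains _ _ (hcont p List.mem_cons_self)]
    simp

-- proof-side names for the ports' fold steps (definitionally the inline lambdas of the ports)
def pvStepB (st : PySem.Dict String Nat × Nat) (p : String × String) : PySem.Dict String Nat × Nat :=
  let a := PySem.Str.lower p.1
  let b := PySem.Str.lower p.2
  let st1 := if st.1.contains a then st else (st.1.insert a st.2, st.2 + 1)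
  let st2 := if st1.1.contains b then st1 else (st1.1.insert b st1.2, st1.2 + 1)
  let la := st2.1.getD a 0
  let lb := st2.1.getD b 0
  if la = lb then st2
  else (PySem.Dict.mk (st2.1.items.map (fun w => (w.1, if w.2 = lb then la else w.2))), st2.2)

def pvStepA (idx : PySem.Dict String Nat) (cs : List Nat × List Nat) (p : String × String) :
    List Nat × List Nat :=
  pvUnion cs.1 cs.2 (idx.getD (PySem.Str.lower p.1) 0) (idx.getD (PySem.Str.lower p.2) 0)

theorem pvStep_spec (words : List String) (idx : PySem.Dict String Nat) (hnd : words.Nodup)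
    (hidx : ∀ k, (hk : k < words.length) → idx.getD words[k] 0 = k)
    (p : String × String) (hina : PySem.Str.lower p.1 ∈ words)
    (hinb : PySem.Str.lower p.2 ∈ words)
    (c s : List Nat) (ρ r : Nat → Nat) (d : PySem.Dict String Nat) (fresh : Nat)
    (hInv : pvInv c ρ r words.length) (hC : pvCpl words ρ d fresh) :
    ∃ ρ' r',
      pvInv (pvStepA idx (c, s) p).1 ρ' r' words.length ∧
      pvCpl words ρ' (pvStepB (d, fresh) p).1 (pvStepB (d, fresh) p).2 ∧
      (∀ w, (pvStepB (d, fresh) p).1.contains w = true ↔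
        (d.contains w = true ∨ w = PySem.Str.lower p.1 ∨ w = PySem.Str.lower p.2)) := by
  obtain ⟨ka, hka, hwa⟩ := List.mem_iff_getElem.mp hina
  obtain ⟨kb, hkb, hwb⟩ := List.mem_iff_getElem.mp hinb
  set a := PySem.Str.lower p.1 with hadef
  set b := PySem.Str.lower p.2 with hbdef
  -- the B step, stage 1: ensure a has a label
  set st1 : PySem.Dict String Nat × Nat :=
    if d.contains a then (d, fresh) else (d.insert a fresh, fresh + 1) with hst1
  have hC1 : pvCpl words ρ st1.1 st1.2 ∧ st1.1.contains a = true ∧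
      (∀ w, st1.1.contains w = true ↔ (d.contains w = true ∨ w = a)) := by
    by_cases hca : d.contains a = true
    · rw [hst1, if_pos hca]
      exact ⟨hC, hca, fun w => by
        constructor
        · exact fun h => Or.inl h
        · rintro (h | h)
          · exact h
          · rw [h]; exact hca⟩
    · rw [hst1, if_neg hca]
      have hca' : d.contains a = false := Bool.not_eq_true _ ▸ (by simpa using hca)
      refine ⟨?_, ?_, ?_⟩
      · have := pvCpl_insert words ρ d fresh hnd hC ka hka (hwa ▸ hca')
        rwa [hwa] at this
      · rw [PySem.Dict.contains_insert]; simp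
      · intro w
        rw [PySem.Dict.contains_insert]
        constructor
        · intro h
          rcases Bool.or_eq_true_iff.mp h with h | h
          · exact Or.inr (beq_iff_eq.mp h)
          · exact Or.inl h
        · rintro (h | h)
          · rw [h]; simp
          · rw [h]; simp
  obtain ⟨hCpl1, hca1, hkeys1⟩ := hC1
  -- stage 2: ensure b has a label
  set st2 : PySem.Dict String Nat × Nat :=
    if st1.1.contains b then st1 else (st1.1.insert b st1.2, st1.2 + 1) with hst2
  have hC2 : pvCpl words ρ st2.1 st2.2 ∧ st2.1.contains a = true ∧ st2.1.contains b = true ∧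
      (∀ w, st2.1.contains w = true ↔ (d.contains w = true ∨ w = a ∨ w = b)) := by
    by_cases hcb : st1.1.contains b = true
    · rw [hst2, if_pos hcb]
      refine ⟨hCpl1, hca1, hcb, fun w => ?_⟩
      rw [hkeys1 w]
      constructor
      · rintro (h | h)
        · exact Or.inl h
        · exact Or.inr (Or.inl h)
      · rintro (h | h | h)
        · exact Or.inl h
        · exact Or.inr h
        · rw [← hkeys1 w, h]; exact hcb
    · rw [hst2, if_neg hcb]
      have hcb' : st1.1.contains b = false := Bool.not_eq_true _ ▸ (by simpa using hcb)
      refine ⟨?_, ?_, ?_, ?_⟩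
      · have := pvCpl_insert words ρ st1.1 st1.2 hnd hCpl1 kb hkb (hwb ▸ hcb')
        rwa [hwb] at this
      · rw [PySem.Dict.contains_insert, hca1]; simp
      · rw [PySem.Dict.contains_insert]; simp
      · intro w
        rw [PySem.Dict.contains_insert]
        constructor
        · intro h
          rcases Bool.or_eq_true_iff.mp h with h | h
          · exact Or.inr (Or.inr (beq_iff_eq.mp h))
          · rcases (hkeys1 w).mp h with h | h
            · exact Or.inl h
            · exact Or.inr (Or.inl h)
        · rintro (h | h | h)
          · rw [(hkeys1 w).mpr (Or.inl h)]; simp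
          · rw [(hkeys1 w).mpr (Or.inr h)]; simp
          · rw [h]; simp
  obtain ⟨hCpl2, hca2, hcb2, hkeys2⟩ := hC2
  obtain ⟨hB1, hB2, hB3, hB4⟩ := hCpl2
  -- the A step is a union on the indices of a and b
  have hstepA : pvStepA idx (c, s) p = pvUnion c s ka kb := by
    rw [pvStepA, ← hadef, ← hbdef, ← hwa, ← hwb, hidx ka hka, hidx kb hkb]
  obtain ⟨ρ', r', hInv', hker⟩ := pvUnion_spec c s ρ r words.length ka kb hInv hka hkb
  rw [hstepA]
  -- B step result
  have hstep : pvStepB (d, fresh) p = (if st2.1.getD a 0 = st2.1.getD b 0 then st2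
      else (PySem.Dict.mk (st2.1.items.map
        (fun w => (w.1, if w.2 = st2.1.getD b 0 then st2.1.getD a 0 else w.2))), st2.2)) := by
    rw [pvStepB, ← hadef, ← hbdef, ← hst1, ← hst2]
  have hρab : st2.1.getD a 0 = st2.1.getD b 0 ↔ ρ ka = ρ kb := by
    have := hB3 ka kb hka hkb (hwa ▸ hca2) (hwb ▸ hcb2)
    rwa [hwa, hwb] at this
  by_cases hll : st2.1.getD a 0 = st2.1.getD b 0
  · -- labels already equal: B leaves the dict unchanged, A's union does not change the kernel
    have hkk : ρ ka = ρ kb := hρab.mp hll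
    have hker' : ∀ i j, i < words.length → j < words.length → (ρ' i = ρ' j ↔ ρ i = ρ j) := by
      intro i j hi hj
      rw [hker i j hi hj]
      constructor
      · rintro (h | ⟨h1, h2⟩)
        · exact h
        · rcases h1 with h1 | h1 <;> rcases h2 with h2 | h2 <;> omega
      · exact fun h => Or.inl h
    rw [hstep, if_pos hll]
    refine ⟨ρ', r', hInv', ⟨hB1, hB2, ?_, ?_⟩, hkeys2⟩
    · intro k1 k2 hk1 hk2 hc1 hc2
      rw [hB3 k1 k2 hk1 hk2 hc1 hc2, hker' k1 k2 hk1 hk2]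
    · intro k hk hc j hj
      rw [hker' j k hj hk]
      exact hB4 k hk hc j hj
  · -- labels differ: B relabels, A's union merges the two classes
    have hkk : ρ ka ≠ ρ kb := fun h => hll (hρab.mpr h)
    rw [hstep, if_neg hll]
    set la := st2.1.getD a 0 with hla
    set lb := st2.1.getD b 0 with hlb
    have hget3 : ∀ w, (PySem.Dict.mk (st2.1.items.map
        (fun q => (q.1, if q.2 = lb then la else q.2)))).get? w
        = (st2.1.get? w).map (fun v => if v = lb then la else v) :=
      fun w => pvGet?_mapVal st2.1.items (fun v => if v = lb then la else v) w
    have hcont3 : ∀ w, (PySem.Dict.mk (st2.1.items.map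
        (fun q => (q.1, if q.2 = lb then la else q.2)))).contains w = st2.1.contains w := by
      intro w
      rw [PySem.Dict.contains_eq_isSome_get?, PySem.Dict.contains_eq_isSome_get?, hget3,
        Option.isSome_map]
    have hsome : ∀ w, st2.1.contains w = true → ∃ v, st2.1.get? w = some v := by
      intro w hw
      rw [PySem.Dict.contains_eq_isSome_get?] at hw
      exact Option.isSome_iff_exists.mp hw
    have hgetD : ∀ w v, st2.1.get? w = some v → st2.1.getD w 0 = v := by
      intro w v hv
      rw [PySem.Dict.getD_eq_get?_getD, hv]; rfl
    have hgetD3 : ∀ w v, st2.1.get? w = some v →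
        (PySem.Dict.mk (st2.1.items.map
          (fun q => (q.1, if q.2 = lb then la else q.2)))).getD w 0
        = (if v = lb then la else v) := by
      intro w v hv
      rw [PySem.Dict.getD_eq_get?_getD, hget3, hv]; rfl
    obtain ⟨va, hva⟩ := hsome a hca2
    have hlava : la = va := hla ▸ hgetD a va hva
    refine ⟨ρ', r', hInv', ⟨?_, ?_, ?_, ?_⟩, ?_⟩
    · intro w hw
      rw [hcont3] at hw
      exact hB1 w hw
    · intro w v hv
      rw [hget3] at hv
      obtain ⟨v0, hv0, hfv⟩ := Option.map_eq_some_iff.mp hv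
      have h0 : v0 < st2.2 := hB2 w v0 hv0
      have hla2 : va < st2.2 := hB2 a va hva
      rw [← hfv]
      split
      · omega
      · exact h0
    · intro k1 k2 hk1 hk2 hc1 hc2
      rw [hcont3] at hc1 hc2
      obtain ⟨v1, hv1⟩ := hsome _ hc1
      obtain ⟨v2, hv2⟩ := hsome _ hc2
      rw [hgetD3 _ _ hv1, hgetD3 _ _ hv2, pvMerge_ker la lb v1 v2]
      have h12 : v1 = v2 ↔ ρ k1 = ρ k2 := by
        rw [← hgetD _ _ hv1, ← hgetD _ _ hv2]
        exact hB3 k1 k2 hk1 hk2 hc1 hc2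
      have h1a : v1 = la ↔ ρ k1 = ρ ka := by
        rw [← hgetD _ _ hv1, hla]
        have := hB3 k1 ka hk1 hka hc1 (hwa ▸ hca2)
        rwa [hwa] at this
      have h1b : v1 = lb ↔ ρ k1 = ρ kb := by
        rw [← hgetD _ _ hv1, hlb]
        have := hB3 k1 kb hk1 hkb hc1 (hwb ▸ hcb2)
        rwa [hwb] at this
      have h2a : v2 = la ↔ ρ k2 = ρ ka := by
        rw [← hgetD _ _ hv2, hla]
        have := hB3 k2 ka hk2 hka hc2 (hwa ▸ hca2)
        rwa [hwa] at this
      have h2b : v2 = lb ↔ ρ k2 = ρ kb := by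
        rw [← hgetD _ _ hv2, hlb]
        have := hB3 k2 kb hk2 hkb hc2 (hwb ▸ hcb2)
        rwa [hwb] at this
      rw [h12, h1a, h1b, h2a, h2b, hker k1 k2 hk1 hk2]
    · intro k hk hc j hj
      rw [hcont3] at hc
      have hcka : ρ k ≠ ρ ka := by
        intro hck
        have hek : ka = k := (hB4 k hk hc ka hka).mp hck.symm
        subst hek
        rw [hwa] at hc
        exact absurd hca2 (by simp [hc])
      have hckb : ρ k ≠ ρ kb := by
        intro hck
        have hek : kb = k := (hB4 k hk hc kb hkb).mp hck.symm
        subst hek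
        rw [hwb] at hc
        exact absurd hcb2 (by simp [hc])
      rw [hker j k hj hk]
      constructor
      · rintro (h | ⟨h1, h2⟩)
        · exact (hB4 k hk hc j hj).mp h
        · rcases h2 with h2 | h2
          · exact absurd h2 hcka
          · exact absurd h2 hckb
      · intro h
        exact Or.inl ((hB4 k hk hc j hj).mpr h)
    · intro w
      rw [hcont3]
      exact hkeys2 w

theorem pvRun_spec (words : List String) (idx : PySem.Dict String Nat) (hnd : words.Nodup)
    (hidx : ∀ k, (hk : k < words.length) → idx.getD words[k] 0 = k) :
    ∀ (syns : List (String × String)) (c s : List Nat) (ρ r : Nat → Nat)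
      (d : PySem.Dict String Nat) (fresh : Nat),
    (∀ p ∈ syns, PySem.Str.lower p.1 ∈ words ∧ PySem.Str.lower p.2 ∈ words) →
    pvInv c ρ r words.length → pvCpl words ρ d fresh →
    ∃ ρ' r',
      pvInv (syns.foldl (pvStepA idx) (c, s)).1 ρ' r' words.length ∧
      pvCpl words ρ' (syns.foldl pvStepB (d, fresh)).1 (syns.foldl pvStepB (d, fresh)).2 ∧
      (∀ w, (syns.foldl pvStepB (d, fresh)).1.contains w = true ↔
        (d.contains w = true ∨ ∃ p ∈ syns, w = PySem.Str.lower p.1 ∨ w = PySem.Str.lower p.2)) := by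
  intro syns
  induction syns with
  | nil =>
    intro c s ρ r d fresh _ hInv hC
    exact ⟨ρ, r, hInv, hC, fun w => by simp⟩
  | cons p t ih =>
    intro c s ρ r d fresh hsyn hInv hC
    obtain ⟨ρ1, r1, hInv1, hCpl1, hkeys1⟩ := pvStep_spec words idx hnd hidx p
      (hsyn p List.mem_cons_self).1 (hsyn p List.mem_cons_self).2 c s ρ r d fresh hInv hC
    rw [List.foldl_cons, List.foldl_cons]
    have hA1 : pvStepA idx (c, s) p = ((pvStepA idx (c, s) p).1, (pvStepA idx (c, s) p).2) := rfl
    rw [hA1]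
    obtain ⟨ρ2, r2, hInv2, hCpl2, hkeys2⟩ := ih (pvStepA idx (c, s) p).1 (pvStepA idx (c, s) p).2
      ρ1 r1 (pvStepB (d, fresh) p).1 (pvStepB (d, fresh) p).2
      (fun q hq => hsyn q (List.mem_cons_of_mem _ hq)) hInv1 hCpl1
    refine ⟨ρ2, r2, ?_, ?_, ?_⟩
    · exact hInv2
    · have : pvStepB (d, fresh) p = ((pvStepB (d, fresh) p).1, (pvStepB (d, fresh) p).2) := rfl
      rw [this]
      exact hCpl2
    · intro w
      have h1 : pvStepB (d, fresh) p = ((pvStepB (d, fresh) p).1, (pvStepB (d, fresh) p).2) := rfl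
      rw [h1, hkeys2 w, hkeys1 w]
      constructor
      · rintro ((h | h | h) | ⟨q, hq, hor⟩)
        · exact Or.inl h
        · exact Or.inr ⟨p, List.mem_cons_self, Or.inl h⟩
        · exact Or.inr ⟨p, List.mem_cons_self, Or.inr h⟩
        · exact Or.inr ⟨q, List.mem_cons_of_mem _ hq, hor⟩
      · rintro (h | ⟨q, hq, hor⟩)
        · exact Or.inl (Or.inl h)
        · rcases List.mem_cons.mp hq with hq | hq
          · subst hq
            rcases hor with hor | hor
            · exact Or.inl (Or.inr (Or.inl hor))
            · exact Or.inl (Or.inr (Or.inr hor))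
          · exact Or.inr ⟨q, hq, hor⟩

def pvElemA (wc : PySem.Dict String Nat) (q : String × String) : String :=
  if PySem.Str.lower q.1 = PySem.Str.lower q.2 then "synonyms\n"
  else if wc.contains (PySem.Str.lower q.1) && wc.contains (PySem.Str.lower q.2) &&
      (wc.getD (PySem.Str.lower q.1) 0 == wc.getD (PySem.Str.lower q.2) 0) then "synonyms\n"
  else "different\n"

def pvElemB (dB : PySem.Dict String Nat) (q : String × String) : String :=
  if PySem.Str.lower q.1 = PySem.Str.lower q.2 ||
      (dB.contains (PySem.Str.lower q.1) && dB.contains (PySem.Str.lower q.2) &&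
        (dB.getD (PySem.Str.lower q.1) 0 == dB.getD (PySem.Str.lower q.2) 0))
  then "synonyms\n" else "different\n"

theorem pvOutA_gen (wc : PySem.Dict String Nat) (qs : List (String × String)) :
    qs.foldl (fun result q =>
      let first_word := PySem.Str.lower q.1
      let second_word := PySem.Str.lower q.2
      if first_word = second_word then result ++ ["synonyms\n"]
      else if wc.contains first_word && wc.contains second_word &&
          (wc.getD first_word 0 == wc.getD second_word 0) then result ++ ["synonyms\n"]
      else result ++ ["different\n"]) []
    = qs.map (pvElemA wc) := by
  have h : (fun (result : List String) (q : String × String) =>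
      let first_word := PySem.Str.lower q.1
      let second_word := PySem.Str.lower q.2
      if first_word = second_word then result ++ ["synonyms\n"]
      else if wc.contains first_word && wc.contains second_word &&
          (wc.getD first_word 0 == wc.getD second_word 0) then result ++ ["synonyms\n"]
      else result ++ ["different\n"])
      = fun result q => result ++ [pvElemA wc q] := by
    funext result q
    rw [pvElemA]
    dsimp only
    split_ifs <;> rfl
  rw [h, PySem.List.foldl_append_singleton_eq_map]
  simp

theorem pvOutB_gen (dB : PySem.Dict String Nat) (qs : List (String × String)) :
    qs.foldl (fun out q =>
      let x := PySem.Str.lower q.1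
      let y := PySem.Str.lower q.2
      if x = y || (dB.contains x && dB.contains y && (dB.getD x 0 == dB.getD y 0))
      then out ++ ["synonyms\n"]
      else out ++ ["different\n"]) []
    = qs.map (pvElemB dB) := by
  have h : (fun (out : List String) (q : String × String) =>
      let x := PySem.Str.lower q.1
      let y := PySem.Str.lower q.2
      if x = y || (dB.contains x && dB.contains y && (dB.getD x 0 == dB.getD y 0))
      then out ++ ["synonyms\n"]
      else out ++ ["different\n"])
      = fun out q => out ++ [pvElemB dB q] := by
    funext out q
    rw [pvElemB]
    dsimp only
    split_ifs <;> rfl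
  rw [h, PySem.List.foldl_append_singleton_eq_map]
  simp

theorem pvRangeGetD (n i : Nat) (h : i < n) : (List.range n).getD i 0 = i := by
  simp [List.getD, h]

theorem pvMain (synonyms queries : List (String × String)) :
    queries.map (pvElemA (get_components synonyms))
    = queries.map (pvElemB ((synonyms.foldl pvStepB (PySem.Dict.empty, 0)).1)) := by
  have hnd : (get_all_words synonyms).Nodup := pvWords_nodup synonyms
  set words := get_all_words synonyms with hw
  set n := words.length with hn
  have hidx := pvIdx_getD words hnd
  have hInv0 : pvInv (List.range n) (fun i => i) (fun _ => 0) n := by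
    constructor
    · exact List.length_range
    · intro i hi; rw [pvRangeGetD n i hi]; exact hi
    · intro i hi; exact pvRangeGetD n i hi
    · intro i hi; exact hi
    · intro i hi; rw [pvRangeGetD n i hi]
    · intro i hi hne; exact absurd (pvRangeGetD n i hi) hne
    · intro i hi hne; exact absurd rfl hne
    · intro i _ _; rfl
    · intro i hi
      have hcp : (List.range n).countP (fun j => (List.range n).getD j 0 == j) = n := by
        rw [List.countP_eq_length.mpr, List.length_range]
        intro x hx
        rw [pvRangeGetD n x (List.mem_range.mp hx)]
        simp
      omega
  have hCpl0 : pvCpl words (fun i => i) PySem.Dict.empty 0 := by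
    refine ⟨?_, ?_, ?_, ?_⟩
    · intro w hw2; rw [PySem.Dict.contains_empty] at hw2; cases hw2
    · intro w v hv; rw [PySem.Dict.get?_empty] at hv; cases hv
    · intro k1 k2 h1 h2 hc; rw [PySem.Dict.contains_empty] at hc; cases hc
    · intro k hk hc j hj; exact Iff.rfl
  have hsyn : ∀ p ∈ synonyms, PySem.Str.lower p.1 ∈ words ∧ PySem.Str.lower p.2 ∈ words := by
    intro p hp
    exact ⟨(pvWords_mem synonyms _).mpr ⟨p, hp, Or.inl rfl⟩,
      (pvWords_mem synonyms _).mpr ⟨p, hp, Or.inr rfl⟩⟩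
  obtain ⟨ρ', r', hInv', hCpl', hkeys'⟩ := pvRun_spec words (get_word_indexes words) hnd hidx
    synonyms (List.range n) (List.replicate n 1) (fun i => i) (fun _ => 0) PySem.Dict.empty 0
    hsyn hInv0 hCpl0
  obtain ⟨hB1, hB2, hB3, hB4⟩ := hCpl'
  have hBcont : ∀ w : String, (synonyms.foldl pvStepB (PySem.Dict.empty, 0)).1.contains w = true
      ↔ w ∈ words := by
    intro w
    rw [hkeys' w]
    simp only [PySem.Dict.contains_empty, Bool.false_eq_true, false_or]
    exact (pvWords_mem synonyms w).symm
  have hwc : (get_components synonyms).items = words.zipIdx.map (fun p => (p.1, ρ' p.2)) := by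
    have hlt : ∀ p ∈ words.zipIdx, p.2 < n := by
      intro p hp
      have := List.mem_zipIdx (show (p.1, p.2) ∈ words.zipIdx 0 from hp)
      omega
    have hcont : ∀ p ∈ words.zipIdx,
        (PySem.Dict.empty : PySem.Dict String Nat).contains p.1 = false :=
      fun p _ => PySem.Dict.contains_empty _
    have hnodup : (words.zipIdx.map Prod.fst).Nodup := by
      rw [List.zipIdx_map_fst]; exact hnd
    exact pvResult_spec n ρ' r' words.zipIdx
      ((synonyms.foldl (pvStepA (get_word_indexes words)) (List.range n, List.replicate n 1)).1)
      PySem.Dict.empty hInv' hlt hcont hnodup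
  have hAkeys : (get_components synonyms).keys = words := by
    show (get_components synonyms).items.map Prod.fst = words
    rw [hwc, List.map_map]
    have hcomp : (Prod.fst ∘ fun p : String × Nat => (p.1, ρ' p.2)) = Prod.fst :=
      funext fun p => rfl
    rw [hcomp, List.zipIdx_map_fst]
  have hAcont : ∀ w : String, (get_components synonyms).contains w = true ↔ w ∈ words := by
    intro w
    rw [PySem.Dict.contains_iff_mem_keys, hAkeys]
  have hAget : ∀ k, (hk : k < n) → (get_components synonyms).getD words[k] 0 = ρ' k := by
    intro k hk
    apply PySem.Dict.getD_of_mem_items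
    · rw [hwc]
      have hmem : words.zipIdx[k]'(by simpa using hk) ∈ words.zipIdx := List.getElem_mem _
      rw [List.getElem_zipIdx, Nat.zero_add] at hmem
      exact List.mem_map_of_mem hmem
    · rw [show (get_components synonyms).keys = words from hAkeys]; exact hnd
  apply List.map_congr_left
  intro q _
  rw [pvElemA, pvElemB]
  by_cases hxy : PySem.Str.lower q.1 = PySem.Str.lower q.2
  · rw [if_pos hxy, if_pos (by rw [hxy]; simp)]
  · have hbx : (decide (PySem.Str.lower q.1 = PySem.Str.lower q.2)) = false := by
      simp [hxy]
    have hcond : ((get_components synonyms).contains (PySem.Str.lower q.1) &&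
        (get_components synonyms).contains (PySem.Str.lower q.2) &&
        ((get_components synonyms).getD (PySem.Str.lower q.1) 0 ==
          (get_components synonyms).getD (PySem.Str.lower q.2) 0))
        = ((synonyms.foldl pvStepB (PySem.Dict.empty, 0)).1.contains (PySem.Str.lower q.1) &&
          (synonyms.foldl pvStepB (PySem.Dict.empty, 0)).1.contains (PySem.Str.lower q.2) &&
          ((synonyms.foldl pvStepB (PySem.Dict.empty, 0)).1.getD (PySem.Str.lower q.1) 0 ==
            (synonyms.foldl pvStepB (PySem.Dict.empty, 0)).1.getD (PySem.Str.lower q.2) 0)) := by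
      by_cases hx : PySem.Str.lower q.1 ∈ words
      · by_cases hy : PySem.Str.lower q.2 ∈ words
        · obtain ⟨k1, hk1, he1⟩ := List.mem_iff_getElem.mp hx
          obtain ⟨k2, hk2, he2⟩ := List.mem_iff_getElem.mp hy
          have hc1A : (get_components synonyms).contains (PySem.Str.lower q.1) = true :=
            (hAcont _).mpr hx
          have hc2A : (get_components synonyms).contains (PySem.Str.lower q.2) = true :=
            (hAcont _).mpr hy
          have hc1B : (synonyms.foldl pvStepB (PySem.Dict.empty, 0)).1.contains
              (PySem.Str.lower q.1) = true := (hBcont _).mpr hx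
          have hc2B : (synonyms.foldl pvStepB (PySem.Dict.empty, 0)).1.contains
              (PySem.Str.lower q.2) = true := (hBcont _).mpr hy
          have hc1B' : (synonyms.foldl pvStepB (PySem.Dict.empty, 0)).1.contains
              words[k1] = true := by rw [he1]; exact hc1B
          have hc2B' : (synonyms.foldl pvStepB (PySem.Dict.empty, 0)).1.contains
              words[k2] = true := by rw [he2]; exact hc2B
          rw [hc1A, hc2A, hc1B, hc2B]
          simp only [Bool.true_and]
          rw [Bool.eq_iff_iff, beq_iff_eq, beq_iff_eq]
          rw [← he1, ← he2]
          rw [hAget k1 hk1, hAget k2 hk2]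
          exact ((hB3 k1 k2 hk1 hk2 hc1B' hc2B').symm).trans
            (Iff.of_eq rfl)
        · have h2A : (get_components synonyms).contains (PySem.Str.lower q.2) = false :=
            Bool.eq_false_iff.mpr (fun hc => hy ((hAcont _).mp hc))
          have h2B : (synonyms.foldl pvStepB (PySem.Dict.empty, 0)).1.contains
              (PySem.Str.lower q.2) = false :=
            Bool.eq_false_iff.mpr (fun hc => hy ((hBcont _).mp hc))
          rw [h2A, h2B]
          simp
      · have h1A : (get_components synonyms).contains (PySem.Str.lower q.1) = false :=
          Bool.eq_false_iff.mpr (fun hc => hx ((hAcont _).mp hc))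
        have h1B : (synonyms.foldl pvStepB (PySem.Dict.empty, 0)).1.contains
            (PySem.Str.lower q.1) = false :=
          Bool.eq_false_iff.mpr (fun hc => hx ((hBcont _).mp hc))
        rw [h1A, h1B]
        simp
    rw [if_neg hxy, hbx, Bool.false_or, hcond]

-- ===== VERDICT (by name: the statement is the Claim_ definition above) =====
theorem are_synonyms_spec : Claim_equal_are_synonyms := by
  intro synonyms queries _
  show are_synonyms synonyms queries = are_synonyms_alt synonyms queries
  calc are_synonyms synonyms queries
      = queries.map (pvElemA (get_components synonyms)) :=
        pvOutA_gen (get_components synonyms) queries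
    _ = queries.map (pvElemB ((synonyms.foldl pvStepB (PySem.Dict.empty, 0)).1)) :=
        pvMain synonyms queries
    _ = are_synonyms_alt synonyms queries :=
        (pvOutB_gen ((synonyms.foldl pvStepB (PySem.Dict.empty, 0)).1) queries).symm
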